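-- pv_equiv track=rewrite | github.com/MatteoPierro/-adventofcode-2021 | tests/test_beacon_scanner.py | get_all_rotated_scanners
-- ===== SOURCE A (Python) =====
-- def get_all_rotated_scanners(scanner):
--     rotations = []
--     for beacon in scanner:
--         orientations = get_orientations(beacon)
--         for index, o in enumerate(orientations):
--             if len(rotations) < index + 1:
--                 rotations.append([])
--             rotations[index].append(o)
--     return rotations
--
-- def get_orientations(point):
--     x, y, z = point
--     for xi, yi, zi in get_z_orientations(x, y, z):
--         yield from get_rotations(xi, yi, zi)
--
-- def get_z_orientations(x, y, z):
--     return [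
--         (x, y, z),
--         (x, z, -y),
--         (x, -y, -z),
--         (x, -z, y),
--         (-z, y, x),
--         (z, y, -x),
--     ]
--
-- def get_rotations(x, y, z):
--     return [
--         (x, y, z),
--         (-y, x, z),
--         (-x, -y, z),
--         (y, -x, z),
--     ]
-- ===== SOURCE B (Python) =====
-- def get_all_rotated_scanners(scanner):
--     # rotation-major: build each of the 24 groups directly by rotating the whole
--     # scanner; groups come out in the order (z-orientation j, quarter-turn r).
--     groups = []
--     for j in range(6):
--         oriented = [_orient(j, beacon) for beacon in scanner]
--         for _ in range(4):
--             groups.append(list(oriented))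
--             oriented = [(-y, x, z) for (x, y, z) in oriented]
--     return groups
--
-- def _orient(j, point):
--     x, y, z = point
--     return [
--         (x, y, z),
--         (x, z, -y),
--         (x, -y, -z),
--         (x, -z, y),
--         (-z, y, x),
--         (z, y, -x),
--     ][j]
-- ===== Notes on version B (the rewrite author's own statement) =====
-- stated objective: alternative
-- what changed: A is beacon-major: it generates all 24 orientations per beacon and scatters them into growing column lists with an index/length check; B is rotation-major: for each of the 6 z-orientations it orients the whole scanner once and then emits 4 groups by repeatedly applying a quarter-turn to the whole oriented scanner, never materialising a per-beacon orientation list.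
-- intended difference: On the empty scanner A returns [] while B returns 24 empty groups; B's is the intended value since a scanner always has exactly 24 rotation groups, empty or not. — e.g. on get_all_rotated_scanners([]): A returns [], B returns [[], [], [], [], [], [], [], [], [], [], [], [], [], [], [], [], [], [], [], [], [], [], [], []]
import Mathlib
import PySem

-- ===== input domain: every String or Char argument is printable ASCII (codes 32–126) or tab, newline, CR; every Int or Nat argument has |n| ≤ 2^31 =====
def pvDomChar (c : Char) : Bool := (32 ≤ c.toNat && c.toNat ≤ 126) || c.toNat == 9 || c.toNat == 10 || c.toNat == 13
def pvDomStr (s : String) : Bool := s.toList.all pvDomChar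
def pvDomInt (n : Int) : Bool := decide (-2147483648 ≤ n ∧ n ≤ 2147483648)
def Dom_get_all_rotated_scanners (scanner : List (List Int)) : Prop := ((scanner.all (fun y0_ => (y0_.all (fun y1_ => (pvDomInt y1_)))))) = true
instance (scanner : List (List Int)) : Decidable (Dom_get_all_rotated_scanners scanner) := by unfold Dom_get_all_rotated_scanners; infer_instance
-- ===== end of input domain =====

-- B is rotation-major (orient the whole scanner, then quarter-turn it four times) instead of
-- A's beacon-major scatter into growing column lists; on the empty scanner B returns the 24
-- (empty) rotation groups where A returns [] — stated as the intended difference D_ below.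

-- ===== PORT A =====
-- shared helpers, unchanged from the Python module
def get_rotations (x y z : Int) : List (List Int) :=
  [[x, y, z], [-y, x, z], [-x, -y, z], [y, -x, z]]

def get_z_orientations (x y z : Int) : List (Int × Int × Int) :=
  [(x, y, z), (x, z, -y), (x, -y, -z), (x, -z, y), (-z, y, x), (z, y, -x)]

-- generator get_orientations(point); 'x, y, z = point' raises unless point has exactly 3 items (excluded by Pre_)
def get_orientations (point : List Int) : List (List Int) :=
  match point with
  | [x, y, z] => (get_z_orientations x y z).flatMap (fun t => get_rotations t.1 t.2.1 t.2.2)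
  | _ => []

-- A's inner 'for index, o in enumerate(orientations)' loop, carried index and rotations state
def innerA (i : Nat) (rot : List (List (List Int))) (ors : List (List Int)) : List (List (List Int)) :=
  match ors with
  | [] => rot
  | o :: rest =>
      let rot' := if rot.length < i + 1 then rot ++ [[]] else rot
      innerA (i + 1) (rot'.set i ((rot'.getD i []) ++ [o])) rest

def get_all_rotated_scanners (scanner : List (List Int)) : List (List (List Int)) :=
  scanner.foldl (fun rot beacon => innerA 0 rot (get_orientations beacon)) []

-- ===== PORT B =====
-- _orient(j, point): pick the j-th z-orientation of the point (triples as 3-lists)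
def orientB (j : Nat) (point : List Int) : List Int :=
  match point with
  | [x, y, z] =>
      ([[x, y, z], [x, z, -y], [x, -y, -z], [x, -z, y], [-z, y, x], [z, y, -x]]).getD j []
  | _ => []

-- the quarter-turn '(-y, x, z) for (x, y, z) in oriented' applied to one point
def quarter (p : List Int) : List Int :=
  match p with
  | [x, y, z] => [-y, x, z]
  | _ => []

def get_all_rotated_scanners_alt (scanner : List (List Int)) : List (List (List Int)) :=
  (List.range 6).foldl (fun groups j =>
    ((List.range 4).foldl
      (fun (st : List (List (List Int)) × List (List Int)) _ =>
        (st.1 ++ [st.2], st.2.map quarter))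
      (groups, scanner.map (orientB j))).1) []

-- ===== PRECONDITION & SPEC =====
-- Pre_ excludes beacons that are not 3-element lists: there 'x, y, z = point' raises ValueError in A (and in B).
def Pre_get_all_rotated_scanners (scanner : List (List Int)) : Prop :=
  ∀ b ∈ scanner, b.length = 3
instance (scanner : List (List Int)) : Decidable (Pre_get_all_rotated_scanners scanner) := by
  unfold Pre_get_all_rotated_scanners; infer_instance
def pvWitness_get_all_rotated_scanners : List (List Int) := [[1, 2, 3], [4, 5, 6]]

-- On the empty scanner A returns [] while B returns 24 empty groups; B's is the intended
-- value since a scanner always has exactly 24 rotation groups, empty or not.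
def D_get_all_rotated_scanners (scanner : List (List Int)) : Prop := scanner = []
instance (scanner : List (List Int)) : Decidable (D_get_all_rotated_scanners scanner) := by
  unfold D_get_all_rotated_scanners; infer_instance

def Spec_get_all_rotated_scanners (scanner : List (List Int)) (out : List (List (List Int))) : Prop := ¬ D_get_all_rotated_scanners scanner → out = get_all_rotated_scanners_alt scanner
instance (scanner : List (List Int)) (out : List (List (List Int))) : Decidable (Spec_get_all_rotated_scanners scanner out) := by unfold Spec_get_all_rotated_scanners; infer_instance

def pvDiffWitness_get_all_rotated_scanners : List (List Int) := []
def pvDiffWitnessOut_get_all_rotated_scanners : (List (List (List Int))) × (List (List (List Int))) :=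
  ([], [[], [], [], [], [], [], [], [], [], [], [], [], [], [], [], [], [], [], [], [], [], [], [], []])

-- ===== CLAIM (what is proved, stated in full; the proofs are below) =====
def Claim_unchanged_get_all_rotated_scanners : Prop := ∀ (scanner : List (List Int)), Dom_get_all_rotated_scanners scanner → Pre_get_all_rotated_scanners scanner → Spec_get_all_rotated_scanners scanner (get_all_rotated_scanners scanner)
def Claim_changed_get_all_rotated_scanners : Prop := Dom_get_all_rotated_scanners (pvDiffWitness_get_all_rotated_scanners) ∧ Pre_get_all_rotated_scanners (pvDiffWitness_get_all_rotated_scanners) ∧ D_get_all_rotated_scanners (pvDiffWitness_get_all_rotated_scanners) ∧ get_all_rotated_scanners (pvDiffWitness_get_all_rotated_scanners) = pvDiffWitnessOut_get_all_rotated_scanners.1 ∧ get_all_rotated_scanners_alt (pvDiffWitness_get_all_rotated_scanners) = pvDiffWitnessOut_get_all_rotated_scanners.2 ∧ pvDiffWitnessOut_get_all_rotated_scanners.1 ≠ pvDiffWitnessOut_get_all_rotated_scanners.2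
def Claim_exact_get_all_rotated_scanners : Prop := ∀ (scanner : List (List Int)), Dom_get_all_rotated_scanners scanner → Pre_get_all_rotated_scanners scanner → D_get_all_rotated_scanners scanner → get_all_rotated_scanners scanner ≠ get_all_rotated_scanners_alt scanner

-- ===== LEMMAS AND PROOFS =====

-- the column picture: column i of the result matrix is rows.map (·.getD i [])
def colsOf (n : Nat) (rows : List (List (List Int))) : List (List (List Int)) :=
  (List.range n).map (fun i => rows.map (fun r => r.getD i []))

theorem orient_length {b : List Int} (h : b.length = 3) : (get_orientations b).length = 24 := by
  rcases b with _ | ⟨x, _ | ⟨y, _ | ⟨z, _ | _⟩⟩⟩ <;> simp_all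
  rfl

theorem innerA_eq (ors : List (List Int)) : ∀ (i : Nat) (rot : List (List (List Int))),
    i ≤ rot.length → rot.length ≤ i + ors.length →
    innerA i rot ors =
      rot.take i ++ (rot.drop i).zipWith (fun c o => c ++ [o]) ors
        ++ (ors.drop (rot.length - i)).map (fun o => [o]) := by
  induction ors with
  | nil =>
    intro i rot h1 h2
    have : rot.length = i := by simp only [List.length_nil] at h2; omega
    simp [innerA, List.take_of_length_le, this.le]
  | cons o rest ih =>
    intro i rot h1 h2
    simp only [innerA]
    by_cases hlt : rot.length < i + 1
    · have hi : rot.length = i := by omega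
      simp only [if_pos hlt]
      have hget : (rot ++ [[]]).getD i ([] : List (List Int)) = [] := by
        rw [← hi]; simp [List.getD_eq_getElem?_getD]
      have hset : (rot ++ [([] : List (List Int))]).set i ([] ++ [o]) = rot ++ [[o]] := by
        rw [← hi]
        rw [List.set_append_right _ _ (le_refl _)]
        simp
      rw [hget, hset]
      rw [ih (i + 1) (rot ++ [[o]]) (by simp [hi]) (by simp only [List.length_append, List.length_cons, List.length_nil, hi]; omega)]
      have ht : (rot ++ [[o]]).take (i + 1) = rot ++ [[o]] := by
        apply List.take_of_length_le; simp [hi]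
      have hd : (rot ++ [[o]]).drop (i + 1) = [] := by
        apply List.drop_eq_nil_of_le; simp [hi]
      have hdr : rot.drop i = [] := List.drop_eq_nil_of_le (by omega)
      rw [ht, hd, hdr]
      simp [hi]
    · have hi : i < rot.length := by omega
      simp only [if_neg hlt]
      have hlen2 : rot.length ≤ i + 1 + rest.length := by
        simp only [List.length_cons] at h2; omega
      rw [ih (i + 1) _ (by simp only [List.length_set]; omega) (by simp only [List.length_set]; omega)]
      have hv : rot.getD i ([] : List (List Int)) = rot[i] := List.getD_eq_getElem rot [] hi
      rw [hv]
      set v := rot[i] ++ [o] with hvdef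
      have hsplit : rot.set i v = rot.take i ++ v :: rot.drop (i + 1) :=
        List.set_eq_take_cons_drop v hi
      have ht : (rot.set i v).take (i + 1) = rot.take i ++ [v] := by
        rw [hsplit, List.take_append]
        have hlen : (rot.take i).length = i := List.length_take_of_le hi.le
        simp [hlen, List.take_of_length_le]
      have hd : (rot.set i v).drop (i + 1) = rot.drop (i + 1) := by
        rw [hsplit, List.drop_append]
        have hlen : (rot.take i).length = i := List.length_take_of_le hi.le
        simp [hlen]
      rw [ht, hd, List.length_set]
      have hdi : rot.drop i = rot[i] :: rot.drop (i + 1) := List.drop_eq_getElem_cons hi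
      have hnn : rot.length - i = (rot.length - (i + 1)) + 1 := by omega
      rw [hnn, hdi]
      simp only [List.drop_succ_cons, List.zipWith_cons_cons, List.cons_append, List.append_assoc]
      simp [hvdef]

theorem range_map_getD {α β : Type} (r : List α) (d : α) (f : α → β) :
    (List.range r.length).map (fun i => f (r.getD i d)) = r.map f := by
  induction r with
  | nil => simp
  | cons a r ih =>
    simp only [List.length_cons, List.range_succ_eq_map, List.map_cons, List.map_map]
    simp only [List.getD_cons_zero]
    refine congrArg _ ?_
    simpa [Function.comp] using ih

theorem colsOf_singleton (n : Nat) (r : List (List Int)) (h : r.length = n) :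
    colsOf n [r] = r.map (fun o => [o]) := by
  subst h
  unfold colsOf
  simpa using range_map_getD r [] (fun o => [o])

theorem colsOf_snoc (n : Nat) (rows : List (List (List Int))) (row : List (List Int))
    (h : row.length = n) :
    colsOf n (rows ++ [row]) = (colsOf n rows).zipWith (fun c o => c ++ [o]) row := by
  apply List.ext_getElem
  · simp [colsOf, h]
  · intro i h1 h2
    have hi : i < row.length := by simp [colsOf] at h1; omega
    simp [colsOf, List.getElem_zipWith, hi]

theorem colsOf_length (n : Nat) (rows : List (List (List Int))) :
    (colsOf n rows).length = n := by simp [colsOf]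

theorem foldl_eq_colsOf (n : Nat) (rows : List (List (List Int)))
    (hrows : ∀ r ∈ rows, r.length = n) (hne : rows ≠ []) :
    rows.foldl (fun rot row => innerA 0 rot row) [] = colsOf n rows := by
  induction rows using List.reverseRecOn with
  | nil => exact absurd rfl hne
  | append_singleton l row ih =>
    have hrow : row.length = n := hrows row (by simp)
    rcases l with _ | ⟨r0, rest⟩
    · simp only [List.nil_append, List.foldl_cons, List.foldl_nil]
      rw [innerA_eq row 0 [] (by simp) (by simp)]
      simp [colsOf_singleton n row hrow]
    · have hl : (r0 :: rest) ≠ [] := by simp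
      have hlens : ∀ r ∈ (r0 :: rest), r.length = n := by
        intro r hr; exact hrows r (List.mem_append_left [row] hr)
      rw [List.foldl_append, ih hlens hl]
      simp only [List.foldl_cons, List.foldl_nil]
      rw [innerA_eq row 0 _ (by simp) (by simp [colsOf_length, hrow])]
      rw [colsOf_snoc n _ row hrow]
      simp [colsOf_length, hrow]

-- per-beacon agreement of B's rotation-major formulas with A's orientation list, per column
theorem beacon_col (b : List Int) (h : b.length = 3) :
    ∀ j r : Nat, j < 6 → r < 4 →
      quarter^[r] (orientB j b) = (get_orientations b).getD (4 * j + r) [] := by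
  rcases b with _ | ⟨x, _ | ⟨y, _ | ⟨z, _ | _⟩⟩⟩ <;> simp_all
  intro j r hj hr
  interval_cases j <;> interval_cases r <;>
    simp [orientB, quarter, get_orientations, get_z_orientations, get_rotations,
      Function.iterate_succ, Function.comp]

-- B's inner 'for _ in range(4)' loop, in closed form: n quarter-turn stages
theorem inner_fold (n : Nat) (groups : List (List (List Int))) (oriented : List (List Int)) :
    (List.range n).foldl
      (fun (st : List (List (List Int)) × List (List Int)) _ =>
        (st.1 ++ [st.2], st.2.map quarter)) (groups, oriented)
      = (groups ++ (List.range n).map (fun r => oriented.map (fun p => quarter^[r] p)),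
         oriented.map (fun p => quarter^[n] p)) := by
  induction n generalizing groups oriented with
  | zero => simp
  | succ n ih =>
    rw [List.range_succ, List.foldl_append, ih]
    simp only [List.foldl_cons, List.foldl_nil, List.map_append, List.map_cons, List.map_nil,
      List.map_map, List.append_assoc]
    rw [Prod.mk.injEq]
    refine ⟨rfl, ?_⟩
    apply List.map_congr_left; intro p _
    simp [Function.comp, Function.iterate_succ_apply']

-- splitting range 24 into 6 blocks of 4 (the (j, r) indexing of the 24 rotations)
theorem range24_split {α : Type} (f : Nat → α) :
    (List.range 6).flatMap (fun j => (List.range 4).map (fun r => f (4 * j + r)))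
      = (List.range 24).map f := by
  simp [show List.range 6 = [0, 1, 2, 3, 4, 5] from rfl,
    show List.range 4 = [0, 1, 2, 3] from rfl,
    show List.range 24 = [0,1,2,3,4,5,6,7,8,9,10,11,12,13,14,15,16,17,18,19,20,21,22,23] from rfl]

-- B's fold, computed out: the 24 columns, rotation-major
theorem alt_eq_cols (scanner : List (List Int)) (hpre : Pre_get_all_rotated_scanners scanner) :
    get_all_rotated_scanners_alt scanner = colsOf 24 (scanner.map get_orientations) := by
  unfold get_all_rotated_scanners_alt
  simp only [inner_fold]
  rw [PySem.List.foldl_append_eq_flatMap]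
  rw [List.nil_append]
  have hcong : (List.range 6).flatMap
      (fun j => (List.range 4).map (fun r => (scanner.map (orientB j)).map (fun p => quarter^[r] p)))
      = (List.range 6).flatMap
      (fun j => (List.range 4).map (fun r =>
          scanner.map (fun b => (get_orientations b).getD (4 * j + r) []))) := by
    apply List.flatMap_congr; intro j hj
    apply List.map_congr_left; intro r hr
    rw [List.map_map]
    apply List.map_congr_left; intro b hb
    exact beacon_col b (hpre b hb) j r (List.mem_range.mp hj) (List.mem_range.mp hr)
  rw [hcong]
  refine Eq.trans (range24_split (fun i => scanner.map (fun b => (get_orientations b).getD i []))) ?_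
  unfold colsOf
  apply List.map_congr_left; intro i _
  rw [List.map_map]
  rfl

-- ===== VERDICT (by name: the statement is the Claim_ definition above) =====
theorem get_all_rotated_scanners_spec : Claim_unchanged_get_all_rotated_scanners := by
  intro scanner _ hpre hnd
  show get_all_rotated_scanners scanner = get_all_rotated_scanners_alt scanner
  rw [alt_eq_cols scanner hpre]
  unfold get_all_rotated_scanners
  rcases scanner with _ | ⟨b, rest⟩
  · exact absurd rfl hnd
  · have hrows : ∀ r ∈ (b :: rest).map (fun beacon => get_orientations beacon), r.length = 24 := by
      intro r hr
      simp only [List.mem_map] at hr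
      obtain ⟨be, hbe, rfl⟩ := hr
      exact orient_length (hpre be hbe)
    have hne : (b :: rest).map (fun beacon => get_orientations beacon) ≠ [] := by simp
    rw [show (List.foldl (fun rot beacon => innerA 0 rot (get_orientations beacon)) [] (b :: rest))
        = ((b :: rest).map (fun beacon => get_orientations beacon)).foldl
            (fun rot row => innerA 0 rot row) [] from (List.foldl_map ..).symm]
    rw [foldl_eq_colsOf 24 _ hrows hne]

theorem get_all_rotated_scanners_changed : Claim_changed_get_all_rotated_scanners := by
  unfold Claim_changed_get_all_rotated_scanners; decide

theorem get_all_rotated_scanners_tight : Claim_exact_get_all_rotated_scanners := by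
  intro scanner _ _ hd
  subst hd
  decide
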